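-- pv_equiv track=rewrite | github.com/lttdvrs/NAPC-2024 | pset8/solution.py | solution
-- ===== SOURCE A (Python) =====
-- def solution(n,w):
--     w=list(map(int, w))
--     a,b=0,0
--     for i in range(n):
--         if w[i]==1:
--             a=3
--         if a > 0:
--             a-=1
--             b+=1
--     return b
-- ===== SOURCE B (Python) =====
-- def solution(n, w):
--     w = list(map(int, w))
--     b = 0
--     for j in range(n):
--         if w[j] == 1 or (j >= 1 and w[j-1] == 1) or (j >= 2 and w[j-2] == 1):
--             b += 1
--     return b
-- ===== Notes on version B (the rewrite author's own statement) =====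
-- stated objective: simpler
-- what changed: Replaces the carried countdown accumulator (a timer reset to 3 on each 1 and decremented) by a stateless per-position test that a 1 occurs among the last three positions w[j], w[j-1], w[j-2].
import Mathlib
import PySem

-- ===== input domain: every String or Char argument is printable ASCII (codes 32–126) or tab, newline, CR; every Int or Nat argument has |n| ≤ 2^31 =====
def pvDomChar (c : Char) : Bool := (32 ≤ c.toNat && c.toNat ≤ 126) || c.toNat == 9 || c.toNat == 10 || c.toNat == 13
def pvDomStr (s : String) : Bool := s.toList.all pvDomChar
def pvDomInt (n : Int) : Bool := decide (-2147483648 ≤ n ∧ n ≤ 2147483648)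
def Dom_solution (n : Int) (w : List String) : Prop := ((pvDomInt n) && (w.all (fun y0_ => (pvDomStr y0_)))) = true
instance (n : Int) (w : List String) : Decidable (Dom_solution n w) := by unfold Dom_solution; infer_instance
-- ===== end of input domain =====

-- B replaces A's carried countdown timer by a stateless test of the three-position window
-- w[j], w[j-1], w[j-2] at each j (objective: simpler; equivalence of return values).

-- ===== PORT A =====
def solution (n : Int) (w : List String) : Int :=
  let ints := w.map (fun s => (PySem.Int.ofStr? s).getD 0)
  let st := (PySem.List.pyRange 0 n 1).foldl
    (fun (st : Int × Int) i =>
      let a := if PySem.List.pyGetD ints i 0 = 1 then 3 else st.1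
      if a > 0 then (a - 1, st.2 + 1) else (a, st.2))
    (0, 0)
  st.2

-- ===== PORT B =====
def solution_alt (n : Int) (w : List String) : Int :=
  let ints := w.map (fun s => (PySem.Int.ofStr? s).getD 0)
  (PySem.List.pyRange 0 n 1).foldl
    (fun b j =>
      if PySem.List.pyGetD ints j 0 = 1 ∨
         (1 ≤ j ∧ PySem.List.pyGetD ints (j - 1) 0 = 1) ∨
         (2 ≤ j ∧ PySem.List.pyGetD ints (j - 2) 0 = 1)
      then b + 1 else b)
    0

-- ===== PRECONDITION & SPEC =====
-- Pre_ excludes exactly the inputs on which Python A raises: a string int() rejects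
-- (ValueError) or an index n exceeding len(w) (IndexError on w[i]).
def Pre_solution (n : Int) (w : List String) : Prop :=
  n ≤ w.length ∧ ∀ s ∈ w, (PySem.Int.ofStr? s).isSome
instance (n : Int) (w : List String) : Decidable (Pre_solution n w) := by
  unfold Pre_solution; infer_instance

def pvWitness_solution : Int × List String := (3, ["1", "0", "2"])

def Spec_solution (n : Int) (w : List String) (out : Int) : Prop := out = solution_alt n w
instance (n : Int) (w : List String) (out : Int) : Decidable (Spec_solution n w out) := by
  unfold Spec_solution; infer_instance

-- ===== CLAIM (what is proved, stated in full; the proofs are below) =====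
def Claim_equal_solution : Prop := ∀ (n : Int) (w : List String), Dom_solution n w → Pre_solution n w → Spec_solution n w (solution n w)

-- ===== LEMMAS AND PROOFS =====

-- the closed form of A's countdown state after k iterations
def pvHit (L : List Int) (j : Int) : Bool :=
  decide (0 ≤ j) && decide (PySem.List.pyGetD L j 0 = 1)

def pvAval (L : List Int) (k : Int) : Int :=
  if pvHit L (k - 1) then 2 else if pvHit L (k - 2) then 1 else 0

lemma pv_step (L : List Int) (k : Nat) (b : Int) :
    (let a := if PySem.List.pyGetD L (k : Int) 0 = 1 then 3 else pvAval L (k : Int);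
     if a > 0 then (a - 1, b + 1) else (a, b))
    = (pvAval L ((k + 1 : Nat) : Int),
       if PySem.List.pyGetD L (k : Int) 0 = 1 ∨
          (1 ≤ (k : Int) ∧ PySem.List.pyGetD L ((k : Int) - 1) 0 = 1) ∨
          (2 ≤ (k : Int) ∧ PySem.List.pyGetD L ((k : Int) - 2) 0 = 1)
       then b + 1 else b) := by
  have hk0 : (0 : Int) ≤ (k : Int) := by positivity
  have i1 : ((k + 1 : Nat) : Int) - 1 = (k : Int) := by push_cast; ring
  have i2 : ((k + 1 : Nat) : Int) - 2 = (k : Int) - 1 := by push_cast; ring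
  have j1 : (1 ≤ (k : Int)) ↔ (0 ≤ (k : Int) - 1) := by omega
  have j2 : (2 ≤ (k : Int)) ↔ (0 ≤ (k : Int) - 2) := by omega
  simp only [pvAval, pvHit, i1, i2, j1, j2]
  by_cases P0 : PySem.List.pyGetD L (k : Int) 0 = 1 <;>
    by_cases P1 : PySem.List.pyGetD L ((k : Int) - 1) 0 = 1 <;>
      by_cases P2 : PySem.List.pyGetD L ((k : Int) - 2) 0 = 1 <;>
        by_cases Q1 : (0 : Int) ≤ (k : Int) - 1 <;>
          by_cases Q2 : (0 : Int) ≤ (k : Int) - 2 <;>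
            simp only [P0, P1, P2, Q1, Q2, hk0, decide_true, decide_false,
              Bool.and_true, Bool.and_false, and_true, and_false,
              or_true, or_false] <;>
              first
                | (exfalso; omega)
                | norm_num

lemma pv_loop_inv (L : List Int) (k : Nat) :
    (PySem.List.pyRange 0 (k : Int) 1).foldl
      (fun (st : Int × Int) i =>
        let a := if PySem.List.pyGetD L i 0 = 1 then 3 else st.1
        if a > 0 then (a - 1, st.2 + 1) else (a, st.2))
      (0, 0)
    = (pvAval L k,
       (PySem.List.pyRange 0 (k : Int) 1).foldl
        (fun b j =>
          if PySem.List.pyGetD L j 0 = 1 ∨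
             (1 ≤ j ∧ PySem.List.pyGetD L (j - 1) 0 = 1) ∨
             (2 ≤ j ∧ PySem.List.pyGetD L (j - 2) 0 = 1)
          then b + 1 else b)
        0) := by
  induction k with
  | zero =>
      simp [pvAval, pvHit]
  | succ k ih =>
      have hr : PySem.List.pyRange 0 ((k + 1 : Nat) : Int) 1
          = PySem.List.pyRange 0 (k : Int) 1 ++ [(k : Int)] := by
        push_cast
        exact PySem.List.pyRange_one_succ_right (by positivity)
      rw [hr, List.foldl_append, List.foldl_append, ih]
      clear ih
      simp only [List.foldl_cons, List.foldl_nil]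
      exact pv_step L k _

lemma pv_range_toNat (n : Int) :
    PySem.List.pyRange 0 n 1 = PySem.List.pyRange 0 ((n.toNat : Nat) : Int) 1 := by
  simp only [PySem.List.pyRange_one]
  congr 2
  omega

-- ===== VERDICT (by name: the statement is the Claim_ definition above) =====
theorem solution_spec : Claim_equal_solution := by
  intro n w _ _
  show solution n w = solution_alt n w
  simp only [solution, solution_alt]
  rw [pv_range_toNat n, pv_loop_inv]
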